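-- pv_equiv track=rewrite | github.com/thegoodparty/runbooks | scripts/python/cluster_voters.py | cluster_name
-- ===== SOURCE A (Python) =====
-- from collections import OrderedDict, defaultdict
--
-- def get_address_number(addr):
--     parts = addr.split()
--     try:
--         return int(parts[0]) if parts else 0
--     except ValueError:
--         return 0
--
-- def get_street_name(addr):
--     parts = addr.split()
--     try:
--         int(parts[0])
--         return " ".join(parts[1:]).strip() if len(parts) > 1 else addr
--     except (ValueError, IndexError):
--         return addr
--
-- def cluster_name(voters):
--     """Generate a human-readable name for a cluster based on dominant streets."""
--     streets = defaultdict(int)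
--     for v in voters:
--         addr = v.get("Residence_Addresses_AddressLine", "")
--         street = get_street_name(addr)
--         if street:
--             streets[street] += 1
--
--     if not streets:
--         return "Unknown Area"
--
--     top = sorted(streets.items(), key=lambda x: -x[1])
--     main_street = top[0][0]
--
--     # Add address range for the main street
--     addrs_on_main = [v for v in voters if get_street_name(v.get("Residence_Addresses_AddressLine", "")) == main_street]
--     nums = sorted(get_address_number(v.get("Residence_Addresses_AddressLine", "")) for v in addrs_on_main)
--     nums = [n for n in nums if n > 0]
--
--     if nums and len(top) == 1:
--         return f"{main_street} {nums[0]}-{nums[-1]}"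
--     elif len(top) > 1:
--         return f"{main_street} & {len(top) - 1} nearby"
--     else:
--         return main_street
-- ===== SOURCE B (Python) =====
-- def cluster_name(voters):
--     """Generate a human-readable name for a cluster based on dominant streets."""
--     KEY = "Residence_Addresses_AddressLine"
--     counts = {}   # street -> voter count, in first-seen order
--     ranges = {}   # street -> (min, max) of its positive house numbers
--     for v in voters:
--         addr = v.get(KEY, "")
--         parts = addr.split()
--         try:
--             n = int(parts[0])
--         except (ValueError, IndexError):
--             n = None
--         if n is None:
--             street, num = addr, 0
--         elif len(parts) > 1:
--             street, num = " ".join(parts[1:]).strip(), n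
--         else:
--             street, num = addr, n
--         if street:
--             counts[street] = counts.get(street, 0) + 1
--             if num > 0:
--                 lo, hi = ranges.get(street, (num, num))
--                 ranges[street] = (min(lo, num), max(hi, num))
--
--     if not counts:
--         return "Unknown Area"
--
--     main, best = None, 0
--     for street, c in counts.items():
--         if c > best:
--             main, best = street, c
--
--     k = len(counts)
--     if k > 1:
--         return f"{main} & {k - 1} nearby"
--     if main in ranges:
--         lo, hi = ranges[main]
--         return f"{main} {lo}-{hi}"
--     return main
-- ===== Notes on version B (the rewrite author's own statement) =====
-- stated objective: alternative
-- what changed: B parses each address once and tallies street counts plus per-street min/max of positive house numbers in a single pass over the voters, then picks the first max-count street by a linear scan, instead of A's separate counting pass, full sort of the street tally, a second filtering pass over all voters, and a sort of the house numbers.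
import Mathlib
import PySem

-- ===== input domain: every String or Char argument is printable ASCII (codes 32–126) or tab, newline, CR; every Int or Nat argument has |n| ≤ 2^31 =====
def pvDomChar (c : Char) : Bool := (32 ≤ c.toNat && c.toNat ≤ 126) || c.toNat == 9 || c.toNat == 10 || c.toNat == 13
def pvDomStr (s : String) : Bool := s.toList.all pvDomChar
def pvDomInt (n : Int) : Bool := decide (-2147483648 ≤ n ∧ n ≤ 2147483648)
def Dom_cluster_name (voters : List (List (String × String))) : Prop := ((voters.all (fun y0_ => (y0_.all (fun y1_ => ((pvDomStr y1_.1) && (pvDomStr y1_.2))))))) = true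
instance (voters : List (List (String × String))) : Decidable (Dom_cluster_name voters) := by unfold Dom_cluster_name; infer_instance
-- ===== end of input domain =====

-- B replaces A's sort-by-count and extra passes over the voters by a single pass that
-- tallies counts and per-street min/max of positive house numbers, then picks the first
-- max-count street in insertion order (objective: alternative algorithm, one pass, no sort).

-- ===== PORT A =====
def pyGetAddressNumber (addr : String) : Int :=
  match PySem.Str.split₀ addr with
  | [] => 0
  | p :: _ =>
    match PySem.Int.ofStr? p with
    | none => 0
    | some n => n

def pyGetStreetName (addr : String) : String :=
  match PySem.Str.split₀ addr with
  | [] => addr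
  | p :: rest =>
    match PySem.Int.ofStr? p with
    | none => addr
    | some _ => if rest ≠ [] then PySem.Str.strip (PySem.Str.join " " rest) else addr

def pyStepA (d : PySem.Dict String Int) (v : List (String × String)) : PySem.Dict String Int :=
  let addr := (PySem.Dict.ofList v).getD "Residence_Addresses_AddressLine" ""
  let street := pyGetStreetName addr
  if street ≠ "" then d.modify street 0 (· + 1) else d

def cluster_name (voters : List (List (String × String))) : String :=
  let streets := voters.foldl pyStepA PySem.Dict.empty
  if streets.size = 0 then "Unknown Area"
  else
    let top := PySem.List.sorted streets.items (fun x => -x.2) false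
    let main_street := (PySem.List.pyGetD top 0 ("", 0)).1
    let addrs_on_main := voters.filter (fun v =>
      pyGetStreetName ((PySem.Dict.ofList v).getD "Residence_Addresses_AddressLine" "") == main_street)
    let nums := PySem.List.sorted (addrs_on_main.map (fun v =>
      pyGetAddressNumber ((PySem.Dict.ofList v).getD "Residence_Addresses_AddressLine" ""))) (fun n => n) false
    let nums2 := nums.filter (fun n => decide (0 < n))
    if nums2 ≠ [] ∧ top.length = 1 then
      main_street ++ " " ++ PySem.Int.toStr (PySem.List.pyGetD nums2 0 0) ++ "-" ++
        PySem.Int.toStr (PySem.List.pyGetD nums2 (-1) 0)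
    else if top.length > 1 then
      main_street ++ " & " ++ PySem.Int.toStr ((top.length : Int) - 1) ++ " nearby"
    else main_street

-- ===== PORT B =====
def pvParseAddr (addr : String) : String × Int :=
  match PySem.Str.split₀ addr with
  | [] => (addr, 0)
  | p :: rest =>
    match PySem.Int.ofStr? p with
    | none => (addr, 0)
    | some n => if rest ≠ [] then (PySem.Str.strip (PySem.Str.join " " rest), n) else (addr, n)

def pvStepB (cr : PySem.Dict String Int × PySem.Dict String (Int × Int))
    (v : List (String × String)) : PySem.Dict String Int × PySem.Dict String (Int × Int) :=
  let addr := (PySem.Dict.ofList v).getD "Residence_Addresses_AddressLine" ""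
  let sn := pvParseAddr addr
  if sn.1 ≠ "" then
    (cr.1.insert sn.1 (cr.1.getD sn.1 0 + 1),
     if 0 < sn.2 then
       let lh := cr.2.getD sn.1 (sn.2, sn.2)
       cr.2.insert sn.1 (min lh.1 sn.2, max lh.2 sn.2)
     else cr.2)
  else cr

def cluster_name_alt (voters : List (List (String × String))) : String :=
  let st := voters.foldl pvStepB (PySem.Dict.empty, PySem.Dict.empty)
  if st.1.size = 0 then "Unknown Area"
  else
    let best := st.1.items.foldl (fun (mb : Option String × Int) p =>
      if mb.2 < p.2 then (some p.1, p.2) else mb) (none, 0)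
    let main := best.1.getD ""
    if st.1.size > 1 then
      main ++ " & " ++ PySem.Int.toStr ((st.1.size : Int) - 1) ++ " nearby"
    else
      match st.2.get? main with
      | some lh => main ++ " " ++ PySem.Int.toStr lh.1 ++ "-" ++ PySem.Int.toStr lh.2
      | none => main

-- ===== PRECONDITION & SPEC =====
def Spec_cluster_name (voters : List (List (String × String))) (out : String) : Prop := out = cluster_name_alt voters
instance (voters : List (List (String × String))) (out : String) : Decidable (Spec_cluster_name voters out) := by unfold Spec_cluster_name; infer_instance

-- ===== CLAIM (what is proved, stated in full; the proofs are below) =====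
def Claim_equal_cluster_name : Prop := ∀ (voters : List (List (String × String))), Dom_cluster_name voters → Spec_cluster_name voters (cluster_name voters)

-- ===== LEMMAS AND PROOFS =====

-- proof-only abbreviations
def pvStreet (v : List (String × String)) : String :=
  pyGetStreetName ((PySem.Dict.ofList v).getD "Residence_Addresses_AddressLine" "")
def pvNum (v : List (String × String)) : Int :=
  pyGetAddressNumber ((PySem.Dict.ofList v).getD "Residence_Addresses_AddressLine" "")
def pvSList (voters : List (List (String × String))) : List String :=
  (voters.map pvStreet).filter (fun s => decide (s ≠ ""))
def pvPnums (voters : List (List (String × String))) (s : String) : List Int :=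
  ((voters.filter (fun v => pvStreet v == s)).map pvNum).filter (fun n => decide (0 < n))
def pvRStep (o : Option (Int × Int)) (n : Int) : Option (Int × Int) :=
  some (match o with | none => (n, n) | some lh => (min lh.1 n, max lh.2 n))

theorem lem_parse (addr : String) :
    pvParseAddr addr = (pyGetStreetName addr, pyGetAddressNumber addr) := by
  unfold pvParseAddr pyGetStreetName pyGetAddressNumber
  rcases PySem.Str.split₀ addr with _ | ⟨p, rest⟩ <;> simp
  rcases PySem.Int.ofStr? p with _ | n <;> simp
  by_cases h : rest = [] <;> simp [h]

theorem lem_cnt (vs : List (List (String × String))) :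
    ∀ d, vs.foldl pyStepA d
      = ((vs.map pvStreet).filter (fun s => decide (s ≠ ""))).foldl (fun d x => d.modify x 0 (· + 1)) d := by
  induction vs with
  | nil => intro d; rfl
  | cons v vs ih =>
    intro d
    have hv : pyGetStreetName ((PySem.Dict.ofList v).getD "Residence_Addresses_AddressLine" "") = pvStreet v := rfl
    simp only [List.foldl_cons, List.map_cons, List.filter_cons, pyStepA, hv]
    by_cases h : pvStreet v = "" <;> simp [h, ih]

theorem lem_proj1 (vs : List (List (String × String))) :
    ∀ c r, (vs.foldl pvStepB (c, r)).1 = vs.foldl pyStepA c := by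
  induction vs with
  | nil => intro c r; rfl
  | cons v vs ih =>
    intro c r
    simp only [List.foldl_cons]
    have hp := lem_parse ((PySem.Dict.ofList v).getD "Residence_Addresses_AddressLine" "")
    by_cases h : pyGetStreetName ((PySem.Dict.ofList v).getD "Residence_Addresses_AddressLine" "") = "" <;>
      simp [pvStepB, pyStepA, hp, h, PySem.Dict.modify, ih]

theorem lem_proj2 (s : String) (hs : s ≠ "") (vs : List (List (String × String))) :
    ∀ c r, ((vs.foldl pvStepB (c, r)).2).get? s = (pvPnums vs s).foldl pvRStep (r.get? s) := by
  induction vs with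
  | nil => intro c r; rfl
  | cons v vs ih =>
    intro c r
    have hv : pvParseAddr ((PySem.Dict.ofList v).getD "Residence_Addresses_AddressLine" "")
        = (pvStreet v, pvNum v) := by rw [lem_parse]; rfl
    have hpn : pvPnums (v :: vs) s
        = if (pvStreet v == s) && decide (0 < pvNum v) then pvNum v :: pvPnums vs s else pvPnums vs s := by
      simp only [pvPnums, List.filter_cons]
      by_cases h1 : pvStreet v == s <;> by_cases h2 : (0:Int) < pvNum v <;> simp [h1, h2]
    simp only [List.foldl_cons, pvStepB, hv, hpn]
    by_cases h : pvStreet v = ""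
    · have h1 : (pvStreet v == s) = false := by rw [h]; exact beq_eq_false_iff_ne.mpr (Ne.symm hs)
      simp [h, hs, ih c r]
    · by_cases h1 : pvStreet v = s
      · by_cases h2 : (0:Int) < pvNum v
        · have hr : ((r.insert s (min (r.getD s (pvNum v, pvNum v)).1 (pvNum v),
              max (r.getD s (pvNum v, pvNum v)).2 (pvNum v))).get? s)
              = pvRStep (r.get? s) (pvNum v) := by
            rw [PySem.Dict.get?_insert_self, PySem.Dict.getD_eq_get?_getD]
            rcases r.get? s with _ | lh <;> simp [pvRStep]
          simp only [h1, h2, beq_self_eq_true, Bool.true_and, decide_eq_true_eq, if_true]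
          rw [if_pos (by simpa [h1] using h), ih, hr]
          simp [h1]
        · simp only [h1]
          rw [if_pos (by simpa [h1] using h), ih]
          simp [h2]
      · have hb : (pvStreet v == s) = false := beq_eq_false_iff_ne.mpr h1
        rw [if_pos (by simpa using h), ih]
        by_cases h2 : (0:Int) < pvNum v
        · rw [if_pos h2]
          rw [PySem.Dict.get?_insert, if_neg (fun hh => h1 hh.symm)]
          simp [hb]
        · rw [if_neg h2]
          simp [hb]

theorem lem_insertBy_ne {α : Type} (before : α → α → Bool) (x : α) (l : List α) :
    PySem.List.insertBy before x l ≠ [] := by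
  cases l with
  | nil => simp [PySem.List.insertBy]
  | cons a t => by_cases h : before x a <;> simp [PySem.List.insertBy, h]

theorem lem_insertBy_headD {α : Type} (before : α → α → Bool) (x a : α) (l : List α) (d : α) :
    (PySem.List.insertBy before x (a :: l)).headD d = if before x a then x else a := by
  by_cases h : before x a <;> simp [PySem.List.insertBy, h]

theorem lem_sorted_headD {α : Type} (before : α → α → Bool) (l : List α) :
    ∀ (acc : List α), acc ≠ [] → ∀ d,
      ((l.foldl (fun acc x => PySem.List.insertBy before x acc) acc).headD d)
        = l.foldl (fun b x => if before x b then x else b) (acc.headD d) := by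
  induction l with
  | nil => intro acc h d; rfl
  | cons x t ih =>
    intro acc h d
    rcases acc with _ | ⟨a, acc⟩
    · exact absurd rfl h
    · simp only [List.foldl_cons]
      rw [ih _ (lem_insertBy_ne _ _ _) d, lem_insertBy_headD]
      rfl

theorem lem_scan (l : List (String × Int)) :
    ∀ (b : String × Int),
      l.foldl (fun (mb : Option String × Int) p => if mb.2 < p.2 then (some p.1, p.2) else mb) (some b.1, b.2)
        = (some (l.foldl (fun b p => if b.2 < p.2 then p else b) b).1,
           (l.foldl (fun b p => if b.2 < p.2 then p else b) b).2) := by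
  induction l with
  | nil => intro b; rfl
  | cons p t ih =>
    intro b
    simp only [List.foldl_cons]
    by_cases h : b.2 < p.2 <;> simp [h, ih]

theorem lem_min_of_le (t : List Int) : ∀ n, (∀ x ∈ t, n ≤ x) → t.foldl min n = n := by
  induction t with
  | nil => intro n _; rfl
  | cons x t ih =>
    intro n h
    simp only [List.foldl_cons]
    rw [min_eq_left (h x (by simp))]
    exact ih n (fun y hy => h y (by simp [hy]))

theorem lem_max_fold (g : Int) (t : List Int) :
    ∀ a, (∀ x ∈ t, x ≤ g) → a ≤ g → (a = g ∨ g ∈ t) → t.foldl max a = g := by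
  induction t with
  | nil =>
    rintro a _ _ (rfl | h)
    · rfl
    · simp at h
  | cons x t ih =>
    rintro a hle hag hmem
    simp only [List.foldl_cons]
    have hx : x ≤ g := hle x (by simp)
    apply ih
    · exact fun y hy => hle y (by simp [hy])
    · exact max_le hag hx
    · rcases hmem with rfl | hmem
      · left; omega
      · rcases List.mem_cons.mp hmem with rfl | hmem
        · left; omega
        · right; exact hmem
    
theorem lem_rfold (l : List Int) :
    ∀ lo hi, l.foldl pvRStep (some (lo, hi)) = some (l.foldl min lo, l.foldl max hi) := by
  induction l with
  | nil => intro lo hi; rfl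
  | cons n t ih => intro lo hi; simp only [List.foldl_cons]; exact ih _ _

theorem lem_le_getLast (l : List Int) (h : l.Pairwise (· ≤ ·)) (hne : l ≠ []) :
    ∀ x ∈ l, x ≤ l.getLast hne := by
  induction l with
  | nil => simp at hne
  | cons a t ih =>
    rcases List.pairwise_cons.mp h with ⟨ha, ht⟩
    intro x hx
    rcases t with _ | ⟨b, t⟩
    · simp at hx; simp [hx]
    · rw [List.getLast_cons (by simp)]
      rcases List.mem_cons.mp hx with rfl | hx
      · exact le_trans (ha b (by simp)) (ih ht (by simp) b (by simp))
      · exact ih ht (by simp) x hx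

theorem lem_sorted_head (p0 : String × Int) (rest : List (String × Int)) :
    PySem.List.pyGetD (PySem.List.sorted (p0 :: rest) (fun x => -x.2) false) 0 ("", 0)
      = rest.foldl (fun b p => if b.2 < p.2 then p else b) p0 := by
  have h1 : ∀ (l : List (String × Int)) (d : String × Int), PySem.List.pyGetD l 0 d = l.headD d := by
    intro l d; cases l <;> simp [PySem.List.pyGetD, PySem.List.pyGet?, PySem.List.pyIdx?]
  rw [h1, PySem.List.sorted_eq_foldl_insertBy]
  simp only [List.foldl_cons]
  have h2 : PySem.List.insertBy (fun a b : String × Int => decide ((-a.2 : Int) < -b.2)) p0 [] = [p0] := by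
    simp [PySem.List.insertBy]
  rw [h2, lem_sorted_headD _ rest [p0] (by simp) ("", 0)]
  have h3 : (fun (b x : String × Int) => if decide ((-x.2 : Int) < -b.2) = true then x else b)
      = (fun (b p : String × Int) => if b.2 < p.2 then p else b) := by
    funext b x; by_cases h : b.2 < x.2 <;> simp [h, neg_lt_neg_iff]
  simp only [List.headD]
  rw [← h3]

theorem lem_main (voters : List (List (String × String))) :
    cluster_name voters = cluster_name_alt voters := by
  have hS : voters.foldl pyStepA PySem.Dict.empty
      = PySem.Dict.counter (pvSList voters) := by
    rw [lem_cnt]; rfl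
  have hst1 : (voters.foldl pvStepB (PySem.Dict.empty, PySem.Dict.empty)).1
      = voters.foldl pyStepA PySem.Dict.empty := lem_proj1 voters _ _
  have hitems : (voters.foldl pyStepA PySem.Dict.empty).items
      = (PySem.Set.ofList (pvSList voters)).map (fun k => (k, ((pvSList voters).count k : Int))) := by
    rw [hS]; exact PySem.Dict.items_counter _
  have hpos : ∀ p ∈ (voters.foldl pyStepA PySem.Dict.empty).items, 1 ≤ p.2 ∧ p.1 ≠ "" := by
    intro p hp
    rw [hitems] at hp
    obtain ⟨k, hk, rfl⟩ := List.mem_map.mp hp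
    have hk' : k ∈ pvSList voters := (PySem.Set.mem_ofList _ _).mp hk
    have hkne : k ≠ "" := by
      have := (List.mem_filter.mp hk').2
      simpa using this
    have hc : 0 < (pvSList voters).count k := List.count_pos_iff.mpr hk'
    refine ⟨?_, hkne⟩
    show (1:Int) ≤ ((pvSList voters).count k : Int)
    exact_mod_cast hc
  simp only [cluster_name, cluster_name_alt, hst1]
  rcases hI : (voters.foldl pyStepA PySem.Dict.empty).items with _ | ⟨p0, rest⟩
  · have hsz : (voters.foldl pyStepA PySem.Dict.empty).size = 0 := by
      simp [PySem.Dict.size, hI]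
    rw [if_pos hsz, if_pos hsz]
  · have hsz : (voters.foldl pyStepA PySem.Dict.empty).size = rest.length + 1 := by
      simp [PySem.Dict.size, hI]
    simp only [hsz]
    have hsz0 : ¬(rest.length + 1 = 0) := by omega
    rw [if_neg hsz0]
    rw [if_neg hsz0]
    have hposp0 := hpos p0 (by rw [hI]; exact List.mem_cons_self ..)
    by_cases hr : rest = []
    · -- exactly one street in the tally
      subst hr
      have htop : PySem.List.sorted [p0] (fun x : String × Int => -x.2) false = [p0] := by
        rw [PySem.List.sorted_eq_foldl_insertBy]
        simp [PySem.List.insertBy]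
      have hA0 : PySem.List.pyGetD [p0] 0 ("", 0) = p0 := rfl
      have hB0 : (if ((none : Option String), (0 : Int)).2 < p0.2 then (some p0.1, p0.2)
          else ((none : Option String), (0 : Int))) = (some p0.1, p0.2) := by
        rw [if_pos (by have := hposp0.1; simpa using by omega)]
      simp only [htop, hA0, hB0, Option.getD_some, List.length_cons, List.length_nil,
        List.foldl_cons, List.foldl_nil]
      conv_rhs => rw [if_neg (by omega)]
      have hget : ((voters.foldl pvStepB (PySem.Dict.empty, PySem.Dict.empty)).2).get? p0.1
          = (pvPnums voters p0.1).foldl pvRStep none := by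
        rw [lem_proj2 p0.1 hposp0.2 voters]
        rw [PySem.Dict.get?_empty]
      rw [hget]
      have hperm : ((PySem.List.sorted (List.map (fun v =>
            pyGetAddressNumber ((PySem.Dict.ofList v).getD "Residence_Addresses_AddressLine" ""))
            (List.filter (fun v =>
              pyGetStreetName ((PySem.Dict.ofList v).getD "Residence_Addresses_AddressLine" "") == p0.1)
              voters)) (fun n => n) false).filter (fun n => decide (0 < n))).Perm (pvPnums voters p0.1) :=
        (PySem.List.sorted_perm _ _ _).filter _
      have hpw : ((PySem.List.sorted (List.map (fun v =>
            pyGetAddressNumber ((PySem.Dict.ofList v).getD "Residence_Addresses_AddressLine" ""))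
            (List.filter (fun v =>
              pyGetStreetName ((PySem.Dict.ofList v).getD "Residence_Addresses_AddressLine" "") == p0.1)
              voters)) (fun n => n) false).filter (fun n => decide (0 < n))).Pairwise (· ≤ ·) := by
        have hp := PySem.List.sorted_pairwise (List.map (fun v =>
            pyGetAddressNumber ((PySem.Dict.ofList v).getD "Residence_Addresses_AddressLine" ""))
            (List.filter (fun v =>
              pyGetStreetName ((PySem.Dict.ofList v).getD "Residence_Addresses_AddressLine" "") == p0.1)
              voters)) (fun n => n)
        exact hp.filter _
      rcases hP : pvPnums voters p0.1 with _ | ⟨n, t⟩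
      · rw [hP] at hperm
        have hnil := hperm.eq_nil
        conv_lhs => rw [if_neg (by rintro ⟨h, -⟩; exact h hnil), if_neg (by omega)]
        rfl
      · rw [hP] at hperm
        have hne2 : ((PySem.List.sorted (List.map (fun v =>
              pyGetAddressNumber ((PySem.Dict.ofList v).getD "Residence_Addresses_AddressLine" ""))
              (List.filter (fun v =>
                pyGetStreetName ((PySem.Dict.ofList v).getD "Residence_Addresses_AddressLine" "") == p0.1)
                voters)) (fun n => n) false).filter (fun n => decide (0 < n))) ≠ [] := by
          intro h
          rw [h] at hperm
          simpa using hperm.length_eq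
        conv_lhs => rw [if_pos ⟨hne2, trivial⟩]
        simp only [List.foldl_cons]
        have h0 : pvRStep none n = some (n, n) := rfl
        rw [h0, lem_rfold t n n]
        rcases hN : ((PySem.List.sorted (List.map (fun v =>
              pyGetAddressNumber ((PySem.Dict.ofList v).getD "Residence_Addresses_AddressLine" ""))
              (List.filter (fun v =>
                pyGetStreetName ((PySem.Dict.ofList v).getD "Residence_Addresses_AddressLine" "") == p0.1)
                voters)) (fun n => n) false).filter (fun n => decide (0 < n))) with _ | ⟨q, t2⟩
        · exact absurd hN hne2
        · rw [hN] at hperm hpw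
          have hqmin : ∀ x ∈ t2, q ≤ x := (List.pairwise_cons.mp hpw).1
          have hnmem : n ∈ q :: t2 := hperm.symm.subset (List.mem_cons_self ..)
          have hqn : q ≤ n := by
            rcases List.mem_cons.mp hnmem with rfl | h
            · exact le_refl _
            · exact hqmin n h
          have hmin : t.foldl min n = q := by
            have e1 : (n :: t).foldl min n = t.foldl min n := by simp
            rw [← e1, List.Perm.foldl_op_eq hperm.symm]
            simp only [List.foldl_cons]
            rw [min_eq_right hqn]
            exact lem_min_of_le t2 q hqmin
          have hg : (q :: t2).getLast (by simp) ∈ q :: t2 := List.getLast_mem _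
          have hle : ∀ x ∈ q :: t2, x ≤ (q :: t2).getLast (by simp) :=
            lem_le_getLast _ hpw (by simp)
          have hmax : t.foldl max n = (q :: t2).getLast (by simp) := by
            have e1 : (n :: t).foldl max n = t.foldl max n := by simp
            rw [← e1, List.Perm.foldl_op_eq hperm.symm]
            simp only [List.foldl_cons]
            apply lem_max_fold
            · exact fun x hx => hle x (List.mem_cons_of_mem _ hx)
            · exact max_le (hle n hnmem) (hle q (List.mem_cons_self ..))
            · rcases List.mem_cons.mp hg with hq | hq
              · left
                rw [hq]
                have hng : n ≤ q := by rw [← hq]; exact hle n hnmem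
                exact max_eq_right hng
              · right; exact hq
          rw [PySem.List.pyGetD_zero_cons, PySem.List.pyGetD_neg_one (q :: t2) 0 (by simp), hmin, hmax]
    · -- several distinct streets
      have hrl : rest.length ≠ 0 := by simpa using hr
      have hlen : (PySem.List.sorted (p0 :: rest) (fun x : String × Int => -x.2) false).length
          = rest.length + 1 := by
        rw [PySem.List.length_sorted]; rfl
      have hhead := lem_sorted_head p0 rest
      have hBfold : ((p0 :: rest).foldl
          (fun (mb : Option String × Int) p => if mb.2 < p.2 then (some p.1, p.2) else mb) (none, 0))
          = (some (rest.foldl (fun b p => if b.2 < p.2 then p else b) p0).1,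
             (rest.foldl (fun b p => if b.2 < p.2 then p else b) p0).2) := by
        simp only [List.foldl_cons]
        rw [if_pos (by have := hposp0.1; simpa using by omega)]
        exact lem_scan rest p0
      simp only [hlen, hhead, hBfold, Option.getD_some]
      conv_lhs => rw [if_neg (by rintro ⟨-, h⟩; omega), if_pos (by omega)]
      conv_rhs => rw [if_pos (by omega)]

-- ===== VERDICT (by name: the statement is the Claim_ definition above) =====
theorem cluster_name_spec : Claim_equal_cluster_name := by
  intro voters _
  unfold Spec_cluster_name
  exact lem_main voters
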